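-- pv_equiv track=rewrite | github.com/notlath/aill-be-sick | backend/app/question_groups.py | check_cough_prerequisite
-- ===== SOURCE A (Python) =====
-- COUGH_EXISTENCE_QUESTIONS: set[str] = {
--     "influenza_q2",  # EN: "Do you have a persistent, dry, or hacking cough?"
--     "measles_q2",  # EN: "Are you experiencing a high fever along with a persistent, dry, hacking cough?"
--     "pneumonia_q1",  # EN: "Are you coughing up thick, wet phlegm..." (implies cough exists)
-- }
--
-- COUGH_CHARACTER_QUESTIONS: set[str] = {
--     "influenza_q9",  # EN: "Is your cough mostly dry, meaning you are not coughing up thick, colored phlegm?"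
-- }
--
-- NO_COUGH_NO_RUNNY_NOSE_QUESTIONS: set[str] = {
--     "dengue_q10",  # EN: "Are you experiencing these symptoms completely without a cough or runny nose?"
--     "typhoid_q10",  # EN: "...without a severe cough or breathing problems?"
--     "diarrhea_q5",  # EN: "...without a cough, runny nose, or difficulty breathing?"
--     "pneumonia_q5",  # EN: "...without a runny nose or sniffles?"
-- }
--
-- def check_cough_prerequisite(
--     answered_questions: dict[str, str], candidate_question_id: str
-- ) -> bool:
--     """
--     Check if a candidate question's cough-related prerequisite is satisfied.
--
--     Args:
--         answered_questions: Dict of {question_id: "yes"|"no"} for answered questions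
--         candidate_question_id: The question we want to ask
--
--     Returns:
--         True if the question can be asked (prerequisite satisfied or no prerequisite)
--         False if the question should be skipped (prerequisite not satisfied)
--     """
--     # Only check for cough character questions
--     if candidate_question_id not in COUGH_CHARACTER_QUESTIONS:
--         return True  # No prerequisite needed
--
--     # Check if user has confirmed they have a cough
--     for q_id, answer in answered_questions.items():
--         # If user answered "yes" to a cough existence question, they have a cough
--         if q_id in COUGH_EXISTENCE_QUESTIONS and answer == "yes":
--             return True  # Cough confirmed, can ask about character
--
--         # If user answered "yes" to a "no cough" differentiator, they DON'T have a cough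
--         if q_id in NO_COUGH_NO_RUNNY_NOSE_QUESTIONS and answer == "yes":
--             return False  # No cough confirmed, skip cough character questions
--
--     # Check if user answered "no" to "without cough" questions
--     # "no" to "without cough" = they DO have cough, but we need to confirm it's actually cough
--     # (could be just runny nose from the compound question)
--     for q_id, answer in answered_questions.items():
--         if q_id in NO_COUGH_NO_RUNNY_NOSE_QUESTIONS and answer == "no":
--             # User said "no" to "without cough/runny nose" - means they have one or both
--             # But we don't know if it's cough specifically!
--             # We should ask a cough existence question first
--             # Check if any cough existence question has been asked
--             cough_confirmed = any(
--                 qid in COUGH_EXISTENCE_QUESTIONS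
--                 and answered_questions.get(qid) == "yes"
--                 for qid in answered_questions
--             )
--             if not cough_confirmed:
--                 return False  # Need to confirm cough existence first
--
--     # If we haven't established cough status yet, don't ask about character
--     # (prefer to ask existence questions first)
--     return False
-- ===== SOURCE B (Python) =====
-- COUGH_EXISTENCE_QUESTIONS: set[str] = {
--     "influenza_q2",
--     "measles_q2",
--     "pneumonia_q1",
-- }
--
-- COUGH_CHARACTER_QUESTIONS: set[str] = {
--     "influenza_q9",
-- }
--
-- NO_COUGH_NO_RUNNY_NOSE_QUESTIONS: set[str] = {
--     "dengue_q10",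
--     "typhoid_q10",
--     "diarrhea_q5",
--     "pneumonia_q5",
-- }
--
-- def check_cough_prerequisite(answered_questions, candidate_question_id):
--     """Positional formulation: gather the positions of every cough-existence 'yes'
--     and every no-cough 'yes'; the question may be asked iff an existence 'yes'
--     exists and comes before any blocking 'yes'. (A's second loop is dead code.)"""
--     if candidate_question_id not in COUGH_CHARACTER_QUESTIONS:
--         return True
--     exist_idx = [i for i, (q, a) in enumerate(answered_questions.items())
--                  if q in COUGH_EXISTENCE_QUESTIONS and a == "yes"]
--     block_idx = [i for i, (q, a) in enumerate(answered_questions.items())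
--                  if q in NO_COUGH_NO_RUNNY_NOSE_QUESTIONS and a == "yes"]
--     if not exist_idx:
--         return False
--     return not block_idx or exist_idx[0] < block_idx[0]
-- ===== Notes on version B (the rewrite author's own statement) =====
-- stated objective: alternative
-- what changed: B replaces A's early-return scan (and A's entire second loop, which is dead code: it is only reached when no existence-'yes' exists, so its nested any() is always False and every path returns False) by a positional formulation: collect the indices of existence-'yes' and blocking-'yes' answers and compare the first positions.
import Mathlib
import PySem

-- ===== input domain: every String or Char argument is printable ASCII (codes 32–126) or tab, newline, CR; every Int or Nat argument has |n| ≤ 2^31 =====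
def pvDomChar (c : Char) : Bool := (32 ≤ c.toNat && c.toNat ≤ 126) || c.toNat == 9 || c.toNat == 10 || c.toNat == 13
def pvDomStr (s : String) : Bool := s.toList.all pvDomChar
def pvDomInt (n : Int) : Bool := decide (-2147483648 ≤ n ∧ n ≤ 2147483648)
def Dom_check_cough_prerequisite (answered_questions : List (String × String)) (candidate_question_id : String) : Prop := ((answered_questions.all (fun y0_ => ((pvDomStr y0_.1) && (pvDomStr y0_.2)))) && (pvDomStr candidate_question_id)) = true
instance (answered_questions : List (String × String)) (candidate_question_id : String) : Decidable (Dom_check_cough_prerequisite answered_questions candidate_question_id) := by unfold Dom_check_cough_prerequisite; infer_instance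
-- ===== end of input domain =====

-- B drops A's dead second loop and replaces the early-return scan by a positional
-- formulation: collect the indices of existence-'yes' and blocking-'yes' answers
-- and compare first positions; objective: alternative (same linear cost).
-- answered_questions is a dict ported as an association list in insertion order.

-- ===== PORT A =====
def pvCoughExistence : PySem.Set String :=
  PySem.Set.ofList ["influenza_q2", "measles_q2", "pneumonia_q1"]

def pvCoughCharacter : PySem.Set String :=
  PySem.Set.ofList ["influenza_q9"]

def pvNoCoughNoRunnyNose : PySem.Set String :=
  PySem.Set.ofList ["dengue_q10", "typhoid_q10", "diarrhea_q5", "pneumonia_q5"]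

-- A's first for-loop over answered_questions.items(): some b = early return b
def pvALoop1 : List (String × String) → Option Bool
  | [] => none
  | (q_id, answer) :: rest =>
    if PySem.Set.contains pvCoughExistence q_id && answer == "yes" then some true
    else if PySem.Set.contains pvNoCoughNoRunnyNose q_id && answer == "yes" then some false
    else pvALoop1 rest

-- A's second for-loop; 'all' is the whole dict, for the nested any()/get scan
def pvALoop2 (all : List (String × String)) : List (String × String) → Option Bool
  | [] => none
  | (q_id, answer) :: rest =>
    if PySem.Set.contains pvNoCoughNoRunnyNose q_id && answer == "no" then
      let cough_confirmed := all.any (fun p =>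
        PySem.Set.contains pvCoughExistence p.1 &&
        (PySem.Dict.ofList all).get? p.1 == some "yes")
      if !cough_confirmed then some false
      else pvALoop2 all rest
    else pvALoop2 all rest

def check_cough_prerequisite (answered_questions : List (String × String)) (candidate_question_id : String) : Bool :=
  if !(PySem.Set.contains pvCoughCharacter candidate_question_id) then true
  else
    match pvALoop1 answered_questions with
    | some b => b
    | none =>
      match pvALoop2 answered_questions answered_questions with
      | some b => b
      | none => false

-- ===== PORT B =====
-- the comprehension '[i for i,(q,a) in enumerate(items) if q in s and a=="yes"]'
def pvYesIdx (s : PySem.Set String) (l : List (String × String)) : List Int :=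
  (PySem.List.enumerate l).filterMap (fun p =>
    if PySem.Set.contains s p.2.1 && p.2.2 == "yes" then some p.1 else none)

def check_cough_prerequisite_alt (answered_questions : List (String × String)) (candidate_question_id : String) : Bool :=
  if !(PySem.Set.contains pvCoughCharacter candidate_question_id) then true
  else
    let exist_idx := pvYesIdx pvCoughExistence answered_questions
    let block_idx := pvYesIdx pvNoCoughNoRunnyNose answered_questions
    match exist_idx with
    | [] => false
    | i :: _ =>
      match block_idx with
      | [] => true
      | j :: _ => decide (i < j)

-- ===== PRECONDITION & SPEC =====
def Spec_check_cough_prerequisite (answered_questions : List (String × String)) (candidate_question_id : String) (out : Bool) : Prop := out = check_cough_prerequisite_alt answered_questions candidate_question_id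
instance (answered_questions : List (String × String)) (candidate_question_id : String) (out : Bool) : Decidable (Spec_check_cough_prerequisite answered_questions candidate_question_id out) := by unfold Spec_check_cough_prerequisite; infer_instance

-- ===== CLAIM (what is proved, stated in full; the proofs are below) =====
def Claim_equal_check_cough_prerequisite : Prop := ∀ (answered_questions : List (String × String)) (candidate_question_id : String), Dom_check_cough_prerequisite answered_questions candidate_question_id → Spec_check_cough_prerequisite answered_questions candidate_question_id (check_cough_prerequisite answered_questions candidate_question_id)

-- ===== LEMMAS AND PROOFS =====

-- A's second loop never early-returns True
theorem pvALoop2_ne_some_true (all rest : List (String × String)) :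
    pvALoop2 all rest ≠ some true := by
  induction rest with
  | nil => simp [pvALoop2]
  | cons p rest ih =>
    obtain ⟨q, a⟩ := p
    simp only [pvALoop2]
    split_ifs <;> simp_all

-- generalized over the enumeration start: index lists with start n
theorem pvYesIdx_enum_cons (s : PySem.Set String) (q a : String)
    (rest : List (String × String)) (n : Int) :
    ((PySem.List.enumerate ((q, a) :: rest) n).filterMap (fun p =>
      if PySem.Set.contains s p.2.1 && p.2.2 == "yes" then some p.1 else none)) =
    (if PySem.Set.contains s q && a == "yes" then [n] else []) ++
    ((PySem.List.enumerate rest (n + 1)).filterMap (fun p =>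
      if PySem.Set.contains s p.2.1 && p.2.2 == "yes" then some p.1 else none)) := by
  rw [PySem.List.enumerate_cons]
  simp only [List.filterMap_cons]
  split_ifs <;> simp

-- every index produced is ≥ the enumeration start
theorem pvYesIdx_ge (s : PySem.Set String) (l : List (String × String)) (n : Int) :
    ∀ i ∈ (PySem.List.enumerate l n).filterMap (fun p =>
      if PySem.Set.contains s p.2.1 && p.2.2 == "yes" then some p.1 else none), n ≤ i := by
  induction l generalizing n with
  | nil => simp [PySem.List.enumerate_nil]
  | cons p rest ih =>
    obtain ⟨q, a⟩ := p
    intro i hi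
    rw [pvYesIdx_enum_cons] at hi
    rcases List.mem_append.mp hi with h | h
    · split_ifs at h <;> simp_all
    · have := ih (n + 1) i h; omega

-- the bridge: A's first loop is determined by the two index lists
theorem pvALoop1_eq (l : List (String × String)) (n : Int) :
    pvALoop1 l =
      (match (PySem.List.enumerate l n).filterMap (fun p =>
          if PySem.Set.contains pvCoughExistence p.2.1 && p.2.2 == "yes" then some p.1 else none),
        (PySem.List.enumerate l n).filterMap (fun p =>
          if PySem.Set.contains pvNoCoughNoRunnyNose p.2.1 && p.2.2 == "yes" then some p.1 else none) with
      | [], [] => none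
      | _ :: _, [] => some true
      | [], _ :: _ => some false
      | i :: _, j :: _ => some (decide (i < j))) := by
  induction l generalizing n with
  | nil => simp [pvALoop1, PySem.List.enumerate_nil]
  | cons p rest ih =>
    obtain ⟨q, a⟩ := p
    rw [pvYesIdx_enum_cons, pvYesIdx_enum_cons]
    simp only [pvALoop1]
    by_cases h1 : PySem.Set.contains pvCoughExistence q && a == "yes" <;>
      by_cases h2 : PySem.Set.contains pvNoCoughNoRunnyNose q && a == "yes"
    · -- impossible: the two literal question sets are disjoint
      exfalso
      have hq1 : q ∈ pvCoughExistence := by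
        have := ((Bool.and_eq_true _ _).mp h1).1
        simpa [PySem.Set.contains] using this
      have hq2 : q ∈ pvNoCoughNoRunnyNose := by
        have := ((Bool.and_eq_true _ _).mp h2).1
        simpa [PySem.Set.contains] using this
      rw [pvCoughExistence, PySem.Set.mem_ofList] at hq1
      rw [pvNoCoughNoRunnyNose, PySem.Set.mem_ofList] at hq2
      simp only [List.mem_cons, List.not_mem_nil, or_false] at hq1 hq2
      rcases hq1 with h | h | h <;> subst h <;> simp at hq2
    · -- existence-yes first: A returns True
      simp only [if_pos h1, if_neg h2, List.cons_append, List.nil_append]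
      cases hb : (PySem.List.enumerate rest (n+1)).filterMap (fun p =>
          if PySem.Set.contains pvNoCoughNoRunnyNose p.2.1 && p.2.2 == "yes" then some p.1 else none) with
      | nil => rfl
      | cons j js =>
        have hj := pvYesIdx_ge pvNoCoughNoRunnyNose rest (n+1) j (hb ▸ List.mem_cons_self ..)
        have hnj : n < j := by omega
        simp [hnj]
    · -- blocking-yes first: A returns False
      simp only [if_neg h1, if_pos h2, List.cons_append, List.nil_append]
      cases he : (PySem.List.enumerate rest (n+1)).filterMap (fun p =>
          if PySem.Set.contains pvCoughExistence p.2.1 && p.2.2 == "yes" then some p.1 else none) with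
      | nil => rfl
      | cons i is =>
        have hi := pvYesIdx_ge pvCoughExistence rest (n+1) i (he ▸ List.mem_cons_self ..)
        have hni : ¬ (i < n) := by omega
        simp [hni]
    · simp only [if_neg h1, if_neg h2, List.nil_append]
      exact ih (n + 1)

-- ===== VERDICT (by name: the statement is the Claim_ definition above) =====
theorem check_cough_prerequisite_spec : Claim_equal_check_cough_prerequisite := by
  intro aq c _
  unfold Spec_check_cough_prerequisite check_cough_prerequisite check_cough_prerequisite_alt
  split_ifs with h
  · rfl
  · have h1 := pvALoop1_eq aq 0
    have h2 := pvALoop2_ne_some_true aq aq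
    unfold pvYesIdx
    cases he : (PySem.List.enumerate aq 0).filterMap (fun p =>
        if PySem.Set.contains pvCoughExistence p.2.1 && p.2.2 == "yes" then some p.1 else none) <;>
      cases hb : (PySem.List.enumerate aq 0).filterMap (fun p =>
        if PySem.Set.contains pvNoCoughNoRunnyNose p.2.1 && p.2.2 == "yes" then some p.1 else none) <;>
      rw [he, hb] at h1 <;> simp only [h1]
    · cases hB : pvALoop2 aq aq with
      | some b => cases b with
        | true => exact absurd hB h2
        | false => simp
      | none => simp
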